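-- pv_equiv track=rewrite | github.com/piotrhelm/NESTFUL | data_v2/executable_functions/py_code_file_3767.py | check_positive_and_unique
-- ===== SOURCE A (Python) =====
-- from typing import List
--
-- def check_positive_and_unique(lst: List[int]) -> bool:
--
--     """Checks if a given list contains only positive integers and no duplicates.
--
--
--
--     Args:
--
--         lst: The list to be checked.
--
--
--
--     Returns:
--
--         True if the list meets the criteria, False otherwise.
--
--     """
--
--     if not all(isinstance(x, int) and x > 0 for x in lst):
--
--         return False
--
--     unique_elements = set(lst)
--
--     if len(lst) == len(unique_elements):
--
--         return True
--
--     else: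
--
--         return False
-- ===== SOURCE B (Python) =====
-- from typing import List
--
-- def check_positive_and_unique(lst: List[int]) -> bool:
--     seen = set()
--     for x in lst:
--         if not isinstance(x, int) or x <= 0 or x in seen:
--             return False
--         seen.add(x)
--     return True
-- ===== Notes on version B (the rewrite author's own statement) =====
-- stated objective: alternative
-- what changed: Merged A's two passes (an all(...) positivity scan followed by building set(lst) and comparing lengths) into one early-exiting loop that maintains a running 'seen' set and rejects a duplicate or non-positive element as soon as it appears.
import Mathlib
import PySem

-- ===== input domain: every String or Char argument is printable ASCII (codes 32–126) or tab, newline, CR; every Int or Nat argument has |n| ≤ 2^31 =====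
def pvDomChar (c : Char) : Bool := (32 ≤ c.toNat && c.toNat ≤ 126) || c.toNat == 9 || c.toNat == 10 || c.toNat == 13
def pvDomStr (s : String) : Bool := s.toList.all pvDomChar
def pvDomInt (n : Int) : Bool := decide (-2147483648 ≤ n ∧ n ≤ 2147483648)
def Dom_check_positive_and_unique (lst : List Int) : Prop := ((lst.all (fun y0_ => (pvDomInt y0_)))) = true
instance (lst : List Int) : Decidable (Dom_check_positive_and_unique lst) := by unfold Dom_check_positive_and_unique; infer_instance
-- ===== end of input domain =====

-- B merges A's two passes (positivity scan, then set(lst) length comparison) into one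
-- early-exiting loop with a running `seen` set; alternative decomposition, same cost.

-- ===== PORT A =====
-- A: all(...) positivity scan, then build set(lst) and compare lengths.
def check_positive_and_unique (lst : List Int) : Bool :=
  if ¬ (lst.all (fun x => decide (x > 0))) then false
  else
    let unique_elements := PySem.Set.ofList lst
    if PySem.List.len lst = PySem.Set.len unique_elements then true
    else false

-- ===== PORT B =====
-- B: one early-exiting pass maintaining a running `seen` set.
def cpuLoop (seen : PySem.Set Int) : List Int → Bool
  | [] => true
  | x :: rest =>
      if x ≤ 0 ∨ PySem.Set.contains seen x then false
      else cpuLoop (PySem.Set.add seen x) rest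

def check_positive_and_unique_alt (lst : List Int) : Bool :=
  cpuLoop PySem.Set.empty lst

-- ===== PRECONDITION & SPEC =====
def Spec_check_positive_and_unique (lst : List Int) (out : Bool) : Prop := out = check_positive_and_unique_alt lst
instance (lst : List Int) (out : Bool) : Decidable (Spec_check_positive_and_unique lst out) := by unfold Spec_check_positive_and_unique; infer_instance

-- ===== CLAIM (what is proved, stated in full; the proofs are below) =====
def Claim_equal_check_positive_and_unique : Prop := ∀ (lst : List Int), Dom_check_positive_and_unique lst → Spec_check_positive_and_unique lst (check_positive_and_unique lst)

-- ===== LEMMAS AND PROOFS =====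

theorem cpu_contains_iff (s : PySem.Set Int) (x : Int) :
    PySem.Set.contains s x = true ↔ x ∈ s := by
  simp [PySem.Set.contains]

theorem cpu_length_add_le (s : PySem.Set Int) (x : Int) :
    (PySem.Set.add s x).length ≤ s.length + 1 := by
  simp only [PySem.Set.add]
  split <;> simp

theorem cpu_length_foldl_add_le (xs : List Int) (s : PySem.Set Int) :
    (xs.foldl PySem.Set.add s).length ≤ s.length + xs.length := by
  induction xs generalizing s with
  | nil => simp
  | cons x rest ih =>
      simp only [List.foldl_cons, List.length_cons]
      calc (rest.foldl PySem.Set.add (PySem.Set.add s x)).length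
          ≤ (PySem.Set.add s x).length + rest.length := ih _
        _ ≤ s.length + 1 + rest.length := by
              have := cpu_length_add_le s x; omega
        _ = s.length + (rest.length + 1) := by omega

-- the one invariant: B's loop succeeds iff every element is positive and the
-- running set grows by exactly one per element (i.e. all elements are fresh)
theorem cpuLoop_char (xs : List Int) (s : PySem.Set Int) :
    cpuLoop s xs =
      (xs.all (fun x => decide (x > 0)) &&
       decide ((xs.foldl PySem.Set.add s).length = s.length + xs.length)) := by
  induction xs generalizing s with
  | nil => simp [cpuLoop]
  | cons x rest ih =>
      simp only [cpuLoop, List.all_cons, List.foldl_cons, List.length_cons]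
      by_cases hx : x ≤ 0
      · have : ¬ x > 0 := by omega
        simp [hx, this]
      · by_cases hm : PySem.Set.contains s x = true
        · -- duplicate: add is a no-op, so the length can never grow enough
          have hmem : x ∈ s := (cpu_contains_iff s x).mp hm
          have hadd : PySem.Set.add s x = s := by
            simp [PySem.Set.add, hmem]
          have hle := cpu_length_foldl_add_le rest s
          rw [if_pos (Or.inr hm)]
          simp only [hadd]
          have hne : ¬ ((rest.foldl PySem.Set.add s).length = s.length + (rest.length + 1)) := by
            omega
          simp [hne]
        · -- fresh positive element: add appends, length grows by one
          have hmem : x ∉ s := fun h => hm ((cpu_contains_iff s x).mpr h)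
          have hadd : PySem.Set.add s x = s ++ [x] := by
            simp [PySem.Set.add, hmem]
          have hpos : x > 0 := by omega
          rw [if_neg (by simp [hx, hmem])]
          simp only [hadd]
          rw [ih]
          simp only [List.length_append, List.length_singleton]
          have harith : s.length + 1 + rest.length = s.length + (rest.length + 1) := by omega
          rw [harith]
          simp [hpos]

-- ===== VERDICT (by name: the statement is the Claim_ definition above) =====
theorem check_positive_and_unique_spec : Claim_equal_check_positive_and_unique := by
  intro lst _
  unfold Spec_check_positive_and_unique
  unfold check_positive_and_unique check_positive_and_unique_alt
  rw [cpuLoop_char]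
  have hofl : PySem.Set.ofList lst = lst.foldl PySem.Set.add PySem.Set.empty :=
    PySem.Set.ofList_eq_foldl lst
  simp only [PySem.List.len, PySem.Set.len, hofl, PySem.Set.empty]
  by_cases hall : lst.all (fun x => decide (x > 0)) = true
  · rw [if_neg (by simp [hall])]
    simp only [hall, Bool.true_and]
    by_cases hlen : (lst.foldl PySem.Set.add []).length = 0 + lst.length
    · have hint : (lst.length : Int) = ((lst.foldl PySem.Set.add []).length : Int) := by
        omega
      simp [hlen, hint]
    · have hint : ¬ ((lst.length : Int) = ((lst.foldl PySem.Set.add []).length : Int)) := by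
        omega
      rw [if_neg hint]
      simp only [Bool.false_eq, decide_eq_false_iff_not, List.length_nil]
      omega
  · simp [hall]
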